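-- pv_equiv track=rewrite | github.com/amitdevv/NoobBook | backend/app/services/tool_executors/csv_tool_executor.py | _get_quality_recommendations
-- ===== SOURCE A (Python) =====
-- from typing import List, Dict, Any, Optional, Tuple
--
-- def _get_quality_recommendations(issues: List[str]) -> List[str]:
--     """Get recommendations based on data quality issues."""
--     recommendations = []
--
--     if any("empty" in issue.lower() for issue in issues):
--         recommendations.append("Consider removing or imputing values for empty columns")
--
--     if any("duplicate" in issue.lower() for issue in issues):
--         recommendations.append("Review and remove duplicate rows to ensure data integrity")
--
--     if any("mixed data types" in issue.lower() for issue in issues):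
--         recommendations.append("Standardize data types within columns for consistent analysis")
--
--     if not issues:
--         recommendations.append("Data quality looks good! Ready for analysis")
--
--     return recommendations
-- ===== SOURCE B (Python) =====
-- def _get_quality_recommendations(issues):
--     """Get recommendations based on data quality issues."""
--     has_empty = has_duplicate = has_mixed = False
--     for issue in issues:
--         low = issue.lower()
--         has_empty = has_empty or "empty" in low
--         has_duplicate = has_duplicate or "duplicate" in low
--         has_mixed = has_mixed or "mixed data types" in low
--     if not issues:
--         return ["Data quality looks good! Ready for analysis"]
--     recommendations = []
--     if has_empty:
--         recommendations.append("Consider removing or imputing values for empty columns")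
--     if has_duplicate:
--         recommendations.append("Review and remove duplicate rows to ensure data integrity")
--     if has_mixed:
--         recommendations.append("Standardize data types within columns for consistent analysis")
--     return recommendations
-- ===== Notes on version B (the rewrite author's own statement) =====
-- stated objective: alternative
-- what changed: Replaces A's three separate any() scans (each lowercasing issues again) with a single pass that lowercases each issue once and ORs it into three boolean flags, plus an early return for the empty list.
import Mathlib
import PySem

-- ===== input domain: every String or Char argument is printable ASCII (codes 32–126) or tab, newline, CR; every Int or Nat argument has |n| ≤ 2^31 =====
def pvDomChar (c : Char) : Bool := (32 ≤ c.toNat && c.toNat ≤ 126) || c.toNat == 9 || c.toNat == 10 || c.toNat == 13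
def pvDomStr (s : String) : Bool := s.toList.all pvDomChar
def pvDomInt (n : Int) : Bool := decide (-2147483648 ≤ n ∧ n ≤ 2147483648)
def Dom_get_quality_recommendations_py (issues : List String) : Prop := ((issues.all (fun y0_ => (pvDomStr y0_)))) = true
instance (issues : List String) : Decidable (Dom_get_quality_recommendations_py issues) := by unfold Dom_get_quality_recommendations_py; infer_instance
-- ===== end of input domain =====

-- B replaces A's three separate any()-scans (each lowercasing issues again) with one pass that
-- lowercases each issue once and accumulates three boolean flags (objective: alternative).

-- ===== PORT A =====
def get_quality_recommendations_py (issues : List String) : List String :=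
  let recommendations : List String := []
  let recommendations :=
    if issues.any (fun issue => PySem.Str.isIn "empty" (PySem.Str.lower issue)) then
      recommendations ++ ["Consider removing or imputing values for empty columns"]
    else recommendations
  let recommendations :=
    if issues.any (fun issue => PySem.Str.isIn "duplicate" (PySem.Str.lower issue)) then
      recommendations ++ ["Review and remove duplicate rows to ensure data integrity"]
    else recommendations
  let recommendations :=
    if issues.any (fun issue => PySem.Str.isIn "mixed data types" (PySem.Str.lower issue)) then
      recommendations ++ ["Standardize data types within columns for consistent analysis"]
    else recommendations
  let recommendations :=
    if issues = [] then
      recommendations ++ ["Data quality looks good! Ready for analysis"]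
    else recommendations
  recommendations

-- ===== PORT B =====
-- single pass: lowercase each issue once, OR into three flags
def pvAltFlags (issues : List String) : Bool × Bool × Bool :=
  issues.foldl
    (fun (f : Bool × Bool × Bool) issue =>
      let low := PySem.Str.lower issue
      (f.1 || PySem.Str.isIn "empty" low,
       f.2.1 || PySem.Str.isIn "duplicate" low,
       f.2.2 || PySem.Str.isIn "mixed data types" low))
    (false, false, false)

def get_quality_recommendations_py_alt (issues : List String) : List String :=
  match issues with
  | [] => ["Data quality looks good! Ready for analysis"]
  | _ =>
    let f := pvAltFlags issues
    let recommendations : List String := []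
    let recommendations :=
      if f.1 then recommendations ++ ["Consider removing or imputing values for empty columns"]
      else recommendations
    let recommendations :=
      if f.2.1 then recommendations ++ ["Review and remove duplicate rows to ensure data integrity"]
      else recommendations
    let recommendations :=
      if f.2.2 then recommendations ++ ["Standardize data types within columns for consistent analysis"]
      else recommendations
    recommendations

-- ===== PRECONDITION & SPEC =====
def Spec_get_quality_recommendations_py (issues : List String) (out : List String) : Prop := out = get_quality_recommendations_py_alt issues
instance (issues : List String) (out : List String) : Decidable (Spec_get_quality_recommendations_py issues out) := by unfold Spec_get_quality_recommendations_py; infer_instance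

-- ===== CLAIM (what is proved, stated in full; the proofs are below) =====
def Claim_equal_get_quality_recommendations_py : Prop := ∀ (issues : List String), Dom_get_quality_recommendations_py issues → Spec_get_quality_recommendations_py issues (get_quality_recommendations_py issues)

-- ===== LEMMAS AND PROOFS =====
lemma pvAltFlags_eq (issues : List String) :
    pvAltFlags issues =
      (issues.any (fun issue => PySem.Str.isIn "empty" (PySem.Str.lower issue)),
       issues.any (fun issue => PySem.Str.isIn "duplicate" (PySem.Str.lower issue)),
       issues.any (fun issue => PySem.Str.isIn "mixed data types" (PySem.Str.lower issue))) := by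
  unfold pvAltFlags
  suffices h : ∀ (a b c : Bool),
      issues.foldl
        (fun (f : Bool × Bool × Bool) issue =>
          let low := PySem.Str.lower issue
          (f.1 || PySem.Str.isIn "empty" low,
           f.2.1 || PySem.Str.isIn "duplicate" low,
           f.2.2 || PySem.Str.isIn "mixed data types" low)) (a, b, c) =
        (a || issues.any (fun issue => PySem.Str.isIn "empty" (PySem.Str.lower issue)),
         b || issues.any (fun issue => PySem.Str.isIn "duplicate" (PySem.Str.lower issue)),
         c || issues.any (fun issue => PySem.Str.isIn "mixed data types" (PySem.Str.lower issue))) by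
    simpa using h false false false
  induction issues with
  | nil => intro a b c; simp
  | cons x xs ih =>
    intro a b c
    rw [List.foldl_cons, ih]
    simp [Bool.or_assoc]

theorem get_quality_recommendations_py_spec_aux (issues : List String) :
    get_quality_recommendations_py issues = get_quality_recommendations_py_alt issues := by
  cases issues with
  | nil => simp [get_quality_recommendations_py, get_quality_recommendations_py_alt]
  | cons x xs =>
    simp only [get_quality_recommendations_py, get_quality_recommendations_py_alt,
      pvAltFlags_eq, if_neg (List.cons_ne_nil x xs)]

-- ===== VERDICT (by name: the statement is the Claim_ definition above) =====
theorem get_quality_recommendations_py_spec : Claim_equal_get_quality_recommendations_py := by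
  intro issues _
  exact get_quality_recommendations_py_spec_aux issues
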